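-- pv_equiv track=rewrite | github.com/ricaportela/bouncy_numbers | bouncy_numbers.py | number_is_increase
-- ===== SOURCE A (Python) =====
-- def number_is_increase(number: int) -> bool:
--     num_str = str(number)
--     previous = 0
--     for c in num_str:
--         c = int(c)
--         if previous > c:
--             return False
--         previous = c
--     return True
-- ===== SOURCE B (Python) =====
-- def number_is_increase(number: int) -> bool:
--     digits = [int(c) for c in str(number)]
--     return digits == sorted(digits)
-- ===== Notes on version B (the rewrite author's own statement) =====
-- stated objective: idiomatic
-- what changed: Replaces the explicit pairwise scan with a previous-digit accumulator by building the digit list once and comparing it to its sorted order (digits == sorted(digits)).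
import Mathlib
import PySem

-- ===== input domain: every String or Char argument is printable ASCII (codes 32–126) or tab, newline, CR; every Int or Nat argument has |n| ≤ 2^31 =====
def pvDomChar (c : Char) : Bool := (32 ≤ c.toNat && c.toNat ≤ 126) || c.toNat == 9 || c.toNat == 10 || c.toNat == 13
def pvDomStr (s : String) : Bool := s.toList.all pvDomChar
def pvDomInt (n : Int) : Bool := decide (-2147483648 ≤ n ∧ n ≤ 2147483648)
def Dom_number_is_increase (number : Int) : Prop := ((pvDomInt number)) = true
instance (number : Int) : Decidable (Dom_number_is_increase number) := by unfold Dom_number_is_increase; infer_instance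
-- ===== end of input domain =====

-- B replaces A's pairwise scan with "digit list equals its sorted order" (idiomatic, same cost class).


-- ===== PORT A =====
-- int(c) on a single digit character: exact for '0'..'9' (Pre_ guarantees number ≥ 0, so
-- str(number) contains only digit characters; on '-' Python's int(c) raises ValueError).
def pvDigitVal (c : Char) : Int := (c.toNat : Int) - 48

-- the for-loop of A: early return False when previous > digit, else carry the digit on
def pvLoopA : Int → List Char → Bool
  | _, [] => true
  | previous, c :: rest =>
      let d := pvDigitVal c
      if previous > d then false else pvLoopA d rest

def number_is_increase (number : Int) : Bool :=
  pvLoopA 0 (PySem.Int.toStr number).toList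

-- ===== PORT B =====
def number_is_increase_alt (number : Int) : Bool :=
  let digits := (PySem.Int.toStr number).toList.map pvDigitVal
  decide (digits = PySem.List.sorted digits (fun x => x) false)

-- ===== PRECONDITION & SPEC =====
-- Pre_ excludes negative numbers: str(number) then starts with '-', on which int('-') raises ValueError in both A and B.
def Pre_number_is_increase (number : Int) : Prop := 0 ≤ number
instance (number : Int) : Decidable (Pre_number_is_increase number) := by unfold Pre_number_is_increase; infer_instance
def pvWitness_number_is_increase : Int := (123)

def Spec_number_is_increase (number : Int) (out : Bool) : Prop := out = number_is_increase_alt number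
instance (number : Int) (out : Bool) : Decidable (Spec_number_is_increase number out) := by unfold Spec_number_is_increase; infer_instance

-- ===== CLAIM (what is proved, stated in full; the proofs are below) =====
def Claim_equal_number_is_increase : Prop := ∀ (number : Int), Dom_number_is_increase number → Pre_number_is_increase number → Spec_number_is_increase number (number_is_increase number)

-- ===== LEMMAS AND PROOFS =====

-- every character produced by Nat.toDigits 10 is a decimal digit character
theorem digitChar_isDigit (m : Nat) (h : m < 10) :
    48 ≤ (Nat.digitChar m).toNat ∧ (Nat.digitChar m).toNat ≤ 57 := by
  interval_cases m <;> decide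

theorem toDigitsCore_isDigit (fuel n : Nat) (ds : List Char)
    (hds : ∀ c ∈ ds, 48 ≤ c.toNat ∧ c.toNat ≤ 57) :
    ∀ c ∈ Nat.toDigitsCore 10 fuel n ds, 48 ≤ c.toNat ∧ c.toNat ≤ 57 := by
  induction fuel generalizing n ds with
  | zero => simpa [Nat.toDigitsCore] using hds
  | succ f ih =>
    intro c hc
    simp only [Nat.toDigitsCore] at hc
    have hd : 48 ≤ (Nat.digitChar (n % 10)).toNat ∧ (Nat.digitChar (n % 10)).toNat ≤ 57 :=
      digitChar_isDigit _ (Nat.mod_lt _ (by norm_num))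
    by_cases h10 : n / 10 = 0
    · rw [if_pos h10] at hc
      rcases List.mem_cons.mp hc with h | h
      · exact h ▸ hd
      · exact hds c h
    · rw [if_neg h10] at hc
      refine ih (n / 10) _ ?_ c hc
      intro x hx
      rcases List.mem_cons.mp hx with h | h
      · exact h ▸ hd
      · exact hds x h

theorem toChars_isDigit (n : Int) (hn : 0 ≤ n) :
    ∀ c ∈ (PySem.Int.toStr n).toList, 48 ≤ c.toNat ∧ c.toNat ≤ 57 := by
  have : (PySem.Int.toStr n).toList = Nat.toDigits 10 n.toNat := by
    rw [PySem.Int.toList_toStr]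
    simp [PySem.Int.toChars, not_lt.mpr hn]
  rw [this]
  exact toDigitsCore_isDigit _ _ [] (by simp)

-- A's loop computes the chain condition on (previous :: digit values)
theorem pvLoopA_eq_chain (cs : List Char) :
    ∀ previous : Int,
      pvLoopA previous cs = true ↔ List.IsChain (· ≤ ·) (previous :: cs.map pvDigitVal) := by
  induction cs with
  | nil => intro p; simp [pvLoopA]
  | cons c rest ih =>
    intro p
    simp only [pvLoopA, List.map_cons, List.isChain_cons_cons]
    by_cases h : p > pvDigitVal c
    · simp [h, not_le.mpr h]
    · simp [h, not_lt.mp h, ih]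

-- B's test computes pairwise ≤ on the digit list
theorem sorted_eq_self_iff_pairwise (xs : List Int) :
    xs = PySem.List.sorted xs (fun x => x) false ↔ xs.Pairwise (· ≤ ·) := by
  constructor
  · intro h
    have := PySem.List.sorted_pairwise xs (fun x => x)
    rw [← h] at this
    simpa using this
  · intro h
    have hs : PySem.List.sorted xs (fun x => x) false = xs :=
      PySem.List.sorted_eq_self_of_pairwise xs (fun x => x) (by simpa using h)
    exact hs.symm

-- ===== VERDICT (by name: the statement is the Claim_ definition above) =====
theorem number_is_increase_spec : Claim_equal_number_is_increase := by
  intro number _ hpre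
  unfold Spec_number_is_increase number_is_increase number_is_increase_alt
  set cs := (PySem.Int.toStr number).toList with hcs
  have hdig : ∀ c ∈ cs, 48 ≤ c.toNat ∧ c.toNat ≤ 57 := toChars_isDigit number hpre
  have hnonneg : ∀ d ∈ cs.map pvDigitVal, (0 : Int) ≤ d := by
    intro d hd
    rcases List.mem_map.mp hd with ⟨c, hc, rfl⟩
    have := (hdig c hc).1
    unfold pvDigitVal; omega
  have hA : pvLoopA 0 cs = true ↔ (cs.map pvDigitVal).Pairwise (· ≤ ·) := by
    rw [pvLoopA_eq_chain, List.isChain_iff_pairwise, List.pairwise_cons]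
    exact ⟨fun h => h.2, fun h => ⟨hnonneg, h⟩⟩
  have hB : (cs.map pvDigitVal = PySem.List.sorted (cs.map pvDigitVal) (fun x => x) false)
      ↔ (cs.map pvDigitVal).Pairwise (· ≤ ·) := sorted_eq_self_iff_pairwise _
  simp only []
  rcases Bool.eq_false_or_eq_true (pvLoopA 0 cs) with h | h
  · rw [h]
    symm
    rw [decide_eq_true_iff]
    exact hB.mpr (hA.mp h)
  · rw [h]
    symm
    rw [decide_eq_false_iff_not]
    intro hc
    have := hA.mpr (hB.mp hc)
    rw [h] at this; exact Bool.false_ne_true this
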